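-- pv_equiv track=rewrite | github.com/marinov98/AoC | 2023/day_11/day_11_puzzle.py | get_dist
-- ===== SOURCE A (Python) =====
-- def get_dist(
--     galaxy: tuple,
--     galaxy_to_compare: tuple,
--     expansion_tracker: set,
--     expansion_offset: int = 1000000,
-- ) -> int:
--     r1, c1 = galaxy
--     r2, c2 = galaxy_to_compare
--
--     ans = 0
--     r1, r2 = min(r1, r2), max(r1, r2)
--     c1, c2 = min(c1, c2), max(c1, c2)
--     for i in range(r1, r2):
--         ans += 1
--         if ("r", i) in expansion_tracker:
--             ans += expansion_offset - 1
--     for j in range(c1, c2):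
--         ans += 1
--         if ("c", j) in expansion_tracker:
--             ans += expansion_offset - 1
--     return ans
-- ===== SOURCE B (Python) =====
-- def get_dist(
--     galaxy: tuple,
--     galaxy_to_compare: tuple,
--     expansion_tracker: set,
--     expansion_offset: int = 1000000,
-- ) -> int:
--     r1, c1 = galaxy
--     r2, c2 = galaxy_to_compare
--     rlo, rhi = min(r1, r2), max(r1, r2)
--     clo, chi = min(c1, c2), max(c1, c2)
--     crossings = 0
--     for tag, idx in expansion_tracker:
--         if tag == "r" and rlo <= idx < rhi:
--             crossings += 1
--         elif tag == "c" and clo <= idx < chi: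
--             crossings += 1
--     return (rhi - rlo) + (chi - clo) + crossings * (expansion_offset - 1)
-- ===== Notes on version B (the rewrite author's own statement) =====
-- stated objective: faster
-- what changed: Instead of walking every cell between the galaxies and adding 1 (plus offset-1 at marked cells), B computes the interval lengths in closed form and makes a single pass over the expansion_tracker set itself, counting entries whose tag/index falls inside the crossed row or column interval, then adds crossings*(expansion_offset-1).
import Mathlib
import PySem

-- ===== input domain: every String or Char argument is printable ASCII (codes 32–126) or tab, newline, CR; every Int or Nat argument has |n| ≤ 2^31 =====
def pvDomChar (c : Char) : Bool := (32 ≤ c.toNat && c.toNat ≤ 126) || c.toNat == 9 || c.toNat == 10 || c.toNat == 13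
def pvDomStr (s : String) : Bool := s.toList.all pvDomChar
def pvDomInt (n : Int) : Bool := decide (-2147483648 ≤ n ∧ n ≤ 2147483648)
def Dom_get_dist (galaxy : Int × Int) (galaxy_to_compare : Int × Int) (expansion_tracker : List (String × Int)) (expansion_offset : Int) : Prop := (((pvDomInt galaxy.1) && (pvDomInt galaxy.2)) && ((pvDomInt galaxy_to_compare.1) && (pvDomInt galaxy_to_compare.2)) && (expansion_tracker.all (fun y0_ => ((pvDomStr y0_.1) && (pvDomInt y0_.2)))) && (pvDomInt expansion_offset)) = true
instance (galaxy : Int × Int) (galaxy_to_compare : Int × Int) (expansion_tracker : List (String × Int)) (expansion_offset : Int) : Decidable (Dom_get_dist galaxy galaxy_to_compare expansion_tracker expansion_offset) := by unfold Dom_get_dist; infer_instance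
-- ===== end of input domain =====

-- B replaces A's walk over every cell between the galaxies by one pass over the
-- expansion_tracker set itself, counting markers inside the crossed intervals
-- (objective: alternative; O(|tracker|) instead of O(distance) for the counting).


-- ===== PORT A =====
def get_dist (galaxy : Int × Int) (galaxy_to_compare : Int × Int) (expansion_tracker : List (String × Int)) (expansion_offset : Int) : Int :=
  let r1 := galaxy.1
  let c1 := galaxy.2
  let r2 := galaxy_to_compare.1
  let c2 := galaxy_to_compare.2
  let rlo := min r1 r2
  let rhi := max r1 r2
  let clo := min c1 c2
  let chi := max c1 c2
  let ans : Int := 0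
  let ans := (PySem.List.pyRange rlo rhi 1).foldl
    (fun a i =>
      let a := a + 1
      if ("r", i) ∈ expansion_tracker then a + (expansion_offset - 1) else a) ans
  let ans := (PySem.List.pyRange clo chi 1).foldl
    (fun a j =>
      let a := a + 1
      if ("c", j) ∈ expansion_tracker then a + (expansion_offset - 1) else a) ans
  ans

-- ===== PORT B =====
def get_dist_alt (galaxy : Int × Int) (galaxy_to_compare : Int × Int) (expansion_tracker : List (String × Int)) (expansion_offset : Int) : Int :=
  let rlo := min galaxy.1 galaxy_to_compare.1
  let rhi := max galaxy.1 galaxy_to_compare.1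
  let clo := min galaxy.2 galaxy_to_compare.2
  let chi := max galaxy.2 galaxy_to_compare.2
  let crossings := expansion_tracker.foldl
    (fun cr p =>
      if p.1 = "r" ∧ rlo ≤ p.2 ∧ p.2 < rhi then cr + 1
      else if p.1 = "c" ∧ clo ≤ p.2 ∧ p.2 < chi then cr + 1
      else cr) (0 : Int)
  (rhi - rlo) + (chi - clo) + crossings * (expansion_offset - 1)

-- ===== PRECONDITION & SPEC =====
-- expansion_tracker is a Python set, so by the type convention its list holds DISTINCT
-- elements; Pre_ states exactly that (it excludes no input the Python A accepts, since a
-- set can never contain duplicates). B iterates the set once, so duplicates would double-count.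
def Pre_get_dist (galaxy : Int × Int) (galaxy_to_compare : Int × Int) (expansion_tracker : List (String × Int)) (expansion_offset : Int) : Prop := expansion_tracker.Nodup
instance (galaxy : Int × Int) (galaxy_to_compare : Int × Int) (expansion_tracker : List (String × Int)) (expansion_offset : Int) : Decidable (Pre_get_dist galaxy galaxy_to_compare expansion_tracker expansion_offset) := by unfold Pre_get_dist; infer_instance
def pvWitness_get_dist : (Int × Int) × (Int × Int) × (List (String × Int)) × Int := ((0, 0), (3, 2), [("r", 1), ("c", 0)], 10)

def Spec_get_dist (galaxy : Int × Int) (galaxy_to_compare : Int × Int) (expansion_tracker : List (String × Int)) (expansion_offset : Int) (out : Int) : Prop := out = get_dist_alt galaxy galaxy_to_compare expansion_tracker expansion_offset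
instance (galaxy : Int × Int) (galaxy_to_compare : Int × Int) (expansion_tracker : List (String × Int)) (expansion_offset : Int) (out : Int) : Decidable (Spec_get_dist galaxy galaxy_to_compare expansion_tracker expansion_offset out) := by unfold Spec_get_dist; infer_instance

-- ===== CLAIM (what is proved, stated in full; the proofs are below) =====
def Claim_equal_get_dist : Prop := ∀ (galaxy : Int × Int) (galaxy_to_compare : Int × Int) (expansion_tracker : List (String × Int)) (expansion_offset : Int), Dom_get_dist galaxy galaxy_to_compare expansion_tracker expansion_offset → Pre_get_dist galaxy galaxy_to_compare expansion_tracker expansion_offset → Spec_get_dist galaxy galaxy_to_compare expansion_tracker expansion_offset (get_dist galaxy galaxy_to_compare expansion_tracker expansion_offset)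

-- ===== LEMMAS AND PROOFS =====

-- A's per-axis loop equals: start + length + (marked cells in the range) * (off - 1).
theorem pv_loop_eq (t : List (String × Int)) (s : String) (off : Int) :
    ∀ (l : List Int) (a : Int),
      l.foldl (fun a i => let a := a + 1; if (s, i) ∈ t then a + (off - 1) else a) a
        = a + l.length + (l.countP (fun i => decide ((s, i) ∈ t))) * (off - 1) := by
  intro l
  induction l with
  | nil => intro a; simp
  | cons x xs ih =>
    intro a
    simp only [List.foldl_cons, List.countP_cons, List.length_cons]
    by_cases h : (s, x) ∈ t
    · rw [ih]; simp [h]; ring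
    · rw [ih]; simp [h]; ring

-- B's loop is a countP of the disjunction of the two (mutually exclusive) tests.
theorem pv_fold_eq_countP (R C : String × Int → Prop) [DecidablePred R] [DecidablePred C] :
    ∀ (t : List (String × Int)) (a : Int),
      t.foldl (fun cr p => if R p then cr + 1 else if C p then cr + 1 else cr) a
        = a + (t.countP (fun p => decide (R p ∨ C p)) : Int) := by
  intro t
  induction t with
  | nil => intro a; simp
  | cons x xs ih =>
    intro a
    simp only [List.foldl_cons, List.countP_cons]
    by_cases hR : R x
    · rw [ih]; simp [hR]; ring
    · by_cases hC : C x
      · rw [ih]; simp [hR, hC]; ring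
      · rw [ih]; simp [hR, hC]

-- countP of an exclusive disjunction splits.
theorem pv_countP_or (t : List (String × Int)) (R C : String × Int → Prop)
    [DecidablePred R] [DecidablePred C] (hdis : ∀ p, ¬(R p ∧ C p)) :
    t.countP (fun p => decide (R p ∨ C p))
      = t.countP (fun p => decide (R p)) + t.countP (fun p => decide (C p)) := by
  induction t with
  | nil => simp
  | cons x xs ih =>
    simp only [List.countP_cons, Bool.decide_or] at ih ⊢
    by_cases hR : R x
    · have : ¬ C x := fun hC => hdis x ⟨hR, hC⟩
      simp [hR, this, ih]; omega
    · by_cases hC : C x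
      · simp [hR, hC, ih]; omega
      · simp [hR, hC, ih]

-- On a nodup list, counting 'j = i ∨ Q j' is counting Q plus one for the single i.
theorem pv_count_insert (Q : Int → Prop) [DecidablePred Q] :
    ∀ (l : List Int), l.Nodup → ∀ (i : Int), i ∈ l → ¬ Q i →
      l.countP (fun j => decide (j = i ∨ Q j)) = l.countP (fun j => decide (Q j)) + 1 := by
  intro l
  induction l with
  | nil => simp
  | cons x xs ih =>
    intro hnd i hi hQ
    have hx : x ∉ xs := (List.nodup_cons.mp hnd).1
    have hnd' : xs.Nodup := (List.nodup_cons.mp hnd).2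
    simp only [List.countP_cons, Bool.decide_or] at ih ⊢
    by_cases hxi : x = i
    · subst hxi
      have hcong : xs.countP (fun j => decide (j = x) || decide (Q j)) = xs.countP (fun j => decide (Q j)) := by
        apply List.countP_congr
        intro j hj
        have : j ≠ x := fun h => hx (h ▸ hj)
        simp [this]
      simp [hQ, hcong]
    · have hi' : i ∈ xs := by
        rcases List.mem_cons.mp hi with h | h
        · exact absurd h.symm hxi
        · exact h
      rw [ih hnd' i hi' hQ]
      by_cases hQx : Q x
      · simp [hQx, hxi]
      · simp [hQx, hxi]

-- Core: counting marked cells over the crossed range equals counting tracker entries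
-- with the right tag inside the interval (tracker nodup — it is a set).
theorem pv_range_count_eq_tracker_count (s : String) (lo hi : Int) :
    ∀ (t : List (String × Int)), t.Nodup →
      (PySem.List.pyRange lo hi 1).countP (fun i => decide ((s, i) ∈ t))
        = t.countP (fun p => decide (p.1 = s ∧ lo ≤ p.2 ∧ p.2 < hi)) := by
  intro t
  induction t with
  | nil => simp
  | cons x xs ih =>
    intro hnd
    have hx : x ∉ xs := (List.nodup_cons.mp hnd).1
    have hnd' : xs.Nodup := (List.nodup_cons.mp hnd).2
    simp only [List.countP_cons]
    by_cases hcase : x.1 = s ∧ lo ≤ x.2 ∧ x.2 < hi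
    · -- x is a marker of this tag inside the range: contributes exactly 1
      obtain ⟨hs, hlo, hhi⟩ := hcase
      have hmem : x.2 ∈ PySem.List.pyRange lo hi 1 := by
        rw [PySem.List.mem_pyRange_one]; exact ⟨hlo, hhi⟩
      have hnotin : ¬ (s, x.2) ∈ xs := by
        intro h
        apply hx
        have : x = (s, x.2) := by
          rcases x with ⟨a, b⟩; simp at hs ⊢; exact hs
        rw [this]; exact h
      have hcong : (PySem.List.pyRange lo hi 1).countP (fun i => decide ((s, i) ∈ x :: xs))
          = (PySem.List.pyRange lo hi 1).countP (fun i => decide (i = x.2 ∨ (s, i) ∈ xs)) := by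
        apply List.countP_congr
        intro i _
        have hiff : (s, i) ∈ x :: xs ↔ (i = x.2 ∨ (s, i) ∈ xs) := by
          rcases x with ⟨a, b⟩
          simp only at hs
          subst hs
          simp only [List.mem_cons, Prod.mk.injEq, true_and]
        simp [hiff]
      rw [hcong,
        pv_count_insert (fun i => (s, i) ∈ xs) (PySem.List.pyRange lo hi 1)
          (PySem.List.nodup_pyRange_one lo hi) x.2 hmem hnotin,
        ih hnd']
      simp [hs, hlo, hhi]
    · -- x never matches a range cell of this tag
      have hcong : (PySem.List.pyRange lo hi 1).countP (fun i => decide ((s, i) ∈ x :: xs))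
          = (PySem.List.pyRange lo hi 1).countP (fun i => decide ((s, i) ∈ xs)) := by
        apply List.countP_congr
        intro i hi
        rw [PySem.List.mem_pyRange_one] at hi
        have hne : (s, i) ≠ x := by
          intro h
          apply hcase
          rw [← h]
          exact ⟨rfl, hi.1, hi.2⟩
        simp [List.mem_cons, hne]
      rw [hcong, ih hnd']
      simp [hcase]

-- ===== VERDICT (by name: the statement is the Claim_ definition above) =====
theorem get_dist_spec : Claim_equal_get_dist := by
  intro g gc t off _ hnd
  unfold Spec_get_dist get_dist get_dist_alt
  simp only [pv_loop_eq, pv_fold_eq_countP]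
  rw [PySem.List.length_pyRange_one, PySem.List.length_pyRange_one]
  rw [pv_countP_or t _ _ (by rintro ⟨a, b⟩ ⟨⟨h1, _⟩, ⟨h2, _⟩⟩; rw [h1] at h2; exact absurd h2 (by decide))]
  rw [← pv_range_count_eq_tracker_count "r" (min g.1 gc.1) (max g.1 gc.1) t hnd,
      ← pv_range_count_eq_tracker_count "c" (min g.2 gc.2) (max g.2 gc.2) t hnd]
  have h1 : ((max g.1 gc.1 - min g.1 gc.1).toNat : Int) = max g.1 gc.1 - min g.1 gc.1 :=
    Int.toNat_of_nonneg (by omega)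
  have h2 : ((max g.2 gc.2 - min g.2 gc.2).toNat : Int) = max g.2 gc.2 - min g.2 gc.2 :=
    Int.toNat_of_nonneg (by omega)
  rw [h1, h2]
  push_cast
  ring
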